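-- pv_equiv track=rewrite | github.com/BHRY1314/offer_python | 面试题20：表示数值的字符串.py | scanUnsignedInteger
-- ===== SOURCE A (Python) =====
-- def scanUnsignedInteger(str):
--     before=0
--     num=0
--     i=0
--     while i<len(str):
--         if str[i] and str[i]>='0' and str[i]<='9':
--             i+=1
--         else:
--             break
--     return i>before
-- ===== SOURCE B (Python) =====
-- def scanUnsignedInteger(str):
--     return len(str) > 0 and '0' <= str[0] <= '9'
-- ===== Notes on version B (the rewrite author's own statement) =====
-- stated objective: simpler
-- what changed: Replaced the digit-scanning while loop (whose count is only compared with 0) by a closed-form check that the first character is an ASCII digit.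
import Mathlib
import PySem

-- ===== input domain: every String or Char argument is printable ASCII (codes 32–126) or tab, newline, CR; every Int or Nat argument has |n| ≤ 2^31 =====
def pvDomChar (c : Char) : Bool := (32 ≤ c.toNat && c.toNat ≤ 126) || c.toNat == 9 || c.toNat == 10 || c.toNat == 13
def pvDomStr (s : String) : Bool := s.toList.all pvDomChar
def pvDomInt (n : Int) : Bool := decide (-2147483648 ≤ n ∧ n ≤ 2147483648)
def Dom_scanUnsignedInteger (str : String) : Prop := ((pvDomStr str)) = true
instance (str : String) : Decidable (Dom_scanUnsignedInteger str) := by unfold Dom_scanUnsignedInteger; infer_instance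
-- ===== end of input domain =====

-- B replaces A's leading-digit while loop (whose count is only tested > 0) by a closed-form check of the first character (objective: simpler).


-- ===== PORT A =====
-- while loop of A: advance i while str[i] is an ASCII digit; returns i > 0
def pvScanLoop (cs : List Char) (i : Nat) : Nat :=
  if h : i < cs.length then
    if '0' ≤ cs[i] ∧ cs[i] ≤ '9' then pvScanLoop cs (i + 1) else i
  else i
termination_by cs.length - i

def scanUnsignedInteger (str : String) : Bool :=
  decide (pvScanLoop str.toList 0 > 0)

-- ===== PORT B =====
-- B: True iff the string is non-empty and its first character is an ASCII digit
def scanUnsignedInteger_alt (str : String) : Bool :=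
  match str.toList with
  | [] => false
  | c :: _ => decide ('0' ≤ c ∧ c ≤ '9')

-- ===== PRECONDITION & SPEC =====
def Spec_scanUnsignedInteger (str : String) (out : Bool) : Prop := out = scanUnsignedInteger_alt str
instance (str : String) (out : Bool) : Decidable (Spec_scanUnsignedInteger str out) := by unfold Spec_scanUnsignedInteger; infer_instance

-- ===== CLAIM (what is proved, stated in full; the proofs are below) =====
def Claim_equal_scanUnsignedInteger : Prop := ∀ (str : String), Dom_scanUnsignedInteger str → Spec_scanUnsignedInteger str (scanUnsignedInteger str)

-- ===== LEMMAS AND PROOFS =====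

-- ===== VERDICT (by name: the statement is the Claim_ definition above) =====
theorem pvScanLoop_le (cs : List Char) (i : Nat) : i ≤ pvScanLoop cs i := by
  fun_induction pvScanLoop cs i with
  | case1 => omega
  | case2 => omega
  | case3 => omega

theorem scanUnsignedInteger_spec : Claim_equal_scanUnsignedInteger := by
  intro str _
  unfold Spec_scanUnsignedInteger scanUnsignedInteger scanUnsignedInteger_alt
  cases h : str.toList with
  | nil => simp [pvScanLoop]
  | cons c rest =>
    unfold pvScanLoop
    have := pvScanLoop_le (c :: rest) 1
    by_cases hd : '0' ≤ c ∧ c ≤ '9'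
    · simp only [List.length_cons, Nat.zero_lt_succ, dif_pos, if_pos hd]
      simp [hd.1, hd.2]
      omega
    · simp only [List.length_cons, Nat.zero_lt_succ, dif_pos, if_neg hd]
      rw [Decidable.not_and_iff_or_not] at hd
      rcases hd with hd | hd <;> simp [hd]
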